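-- pv_equiv track=rewrite | github.com/pravhub/Coding-Interviews | lc2610.py | findMatrix_lookups
-- ===== SOURCE A (Python) =====
-- from typing import List
--
-- def findMatrix_lookups(nums: List[int]) -> List[List[int]]:
--     ans = [[]]
--     for i in nums:
--         added = False
--         for l in ans:
--             if i not in l:
--                 l.append(i)
--                 added = True
--                 break
--         if not added:
--             ans.append([i])
--
--     return ans
-- ===== SOURCE B (Python) =====
-- from typing import List
--
-- def findMatrix_lookups(nums: List[int]) -> List[List[int]]:
--     occ = {}
--     rows = []
--     for i in nums:
--         k = occ.get(i, 0)
--         if k == len(rows):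
--             rows.append([])
--         rows[k].append(i)
--         occ[i] = k + 1
--     return rows
-- ===== Notes on version B (the rewrite author's own statement) =====
-- stated objective: faster
-- what changed: Replaces A's scan over all existing rows for each element by a single pass keeping an occurrence-count dict: the k-th occurrence of a value goes directly into row k.
-- intended difference: On the empty input list A returns [[]] (its seeded empty row is never removed) while B returns [], which is the intended matrix with no rows of a distinct-rows decomposition of no elements. — e.g. on findMatrix_lookups([]): A returns [[]], B returns []
import Mathlib
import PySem

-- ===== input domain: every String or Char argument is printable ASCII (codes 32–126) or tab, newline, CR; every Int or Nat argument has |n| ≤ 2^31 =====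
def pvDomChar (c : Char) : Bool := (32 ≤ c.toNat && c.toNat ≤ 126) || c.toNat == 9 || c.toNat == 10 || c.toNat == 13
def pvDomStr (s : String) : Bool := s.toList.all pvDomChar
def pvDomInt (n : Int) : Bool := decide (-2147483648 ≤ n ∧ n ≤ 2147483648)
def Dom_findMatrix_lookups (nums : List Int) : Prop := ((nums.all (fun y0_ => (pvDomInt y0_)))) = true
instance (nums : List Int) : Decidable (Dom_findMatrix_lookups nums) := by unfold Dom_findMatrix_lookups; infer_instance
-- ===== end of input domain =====

-- B replaces A's per-element scan over all rows by a single pass with an occurrence-count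
-- dict (the k-th occurrence of a value goes into row k); objective: faster (asymptotic).
-- Note: A mutates nothing observable to the caller; equivalence is about the return value.

-- ===== PORT A =====
-- inner 'for l in ans' loop with break: first row not containing i gets i appended;
-- returns none when every row contains i ('added' stays False)
def pvFindRow (i : Int) : List (List Int) → Option (List (List Int))
  | [] => none
  | l :: rest =>
      if i ∈ l then (pvFindRow i rest).map (l :: ·)
      else some ((l ++ [i]) :: rest)

def pvStepA (ans : List (List Int)) (i : Int) : List (List Int) :=
  match pvFindRow i ans with
  | some a => a
  | none => ans ++ [[i]]

def findMatrix_lookups (nums : List Int) : List (List Int) :=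
  nums.foldl pvStepA [[]]

-- ===== PORT B =====
-- rows[k].append(i) (k is always a valid index when called)
def pvAppendAt : List (List Int) → Nat → Int → List (List Int)
  | [], _, _ => []
  | l :: rest, 0, i => (l ++ [i]) :: rest
  | l :: rest, n+1, i => l :: pvAppendAt rest n i

def pvStepB (st : PySem.Dict Int Int × List (List Int)) (i : Int) :
    PySem.Dict Int Int × List (List Int) :=
  let k := st.1.getD i 0
  let rows := if k = (st.2.length : Int) then st.2 ++ [[]] else st.2
  (st.1.insert i (k + 1), pvAppendAt rows k.toNat i)

def findMatrix_lookups_alt (nums : List Int) : List (List Int) :=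
  (nums.foldl pvStepB (PySem.Dict.empty, [])).2

-- ===== PRECONDITION & SPEC =====
-- On the empty input A returns [[]] (its seeded empty row is never removed) while B
-- returns [], the intended matrix with no rows for a decomposition of no elements.
def D_findMatrix_lookups (nums : List Int) : Prop := nums = []
instance (nums : List Int) : Decidable (D_findMatrix_lookups nums) := by
  unfold D_findMatrix_lookups; infer_instance

def Spec_findMatrix_lookups (nums : List Int) (out : List (List Int)) : Prop :=
  ¬ D_findMatrix_lookups nums → out = findMatrix_lookups_alt nums
instance (nums : List Int) (out : List (List Int)) : Decidable (Spec_findMatrix_lookups nums out) := by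
  unfold Spec_findMatrix_lookups; infer_instance

def pvDiffWitness_findMatrix_lookups : List Int := []
def pvDiffWitnessOut_findMatrix_lookups : (List (List Int)) × (List (List Int)) := ([[]], [])

-- ===== CLAIM (what is proved, stated in full; the proofs are below) =====
def Claim_unchanged_findMatrix_lookups : Prop := ∀ (nums : List Int), Dom_findMatrix_lookups nums → Spec_findMatrix_lookups nums (findMatrix_lookups nums)
def Claim_changed_findMatrix_lookups : Prop := Dom_findMatrix_lookups (pvDiffWitness_findMatrix_lookups) ∧ D_findMatrix_lookups (pvDiffWitness_findMatrix_lookups) ∧ findMatrix_lookups (pvDiffWitness_findMatrix_lookups) = pvDiffWitnessOut_findMatrix_lookups.1 ∧ findMatrix_lookups_alt (pvDiffWitness_findMatrix_lookups) = pvDiffWitnessOut_findMatrix_lookups.2 ∧ pvDiffWitnessOut_findMatrix_lookups.1 ≠ pvDiffWitnessOut_findMatrix_lookups.2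
def Claim_exact_findMatrix_lookups : Prop := ∀ (nums : List Int), Dom_findMatrix_lookups nums → D_findMatrix_lookups nums → findMatrix_lookups nums ≠ findMatrix_lookups_alt nums

-- ===== LEMMAS AND PROOFS =====

-- invariant of B's state: counts are nonnegative and 'v lies in row j iff j < count v'
def pvInv (occ : PySem.Dict Int Int) (rows : List (List Int)) : Prop :=
  (∀ v : Int, 0 ≤ occ.getD v 0) ∧
  (∀ (v : Int) (j : Nat), v ∈ rows.getD j [] ↔ (j : Int) < occ.getD v 0)

lemma pvFindRow_eq (i : Int) (rows : List (List Int)) (k : Nat)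
    (h : ∀ j : Nat, i ∈ rows.getD j [] ↔ j < k) :
    pvFindRow i rows = if k < rows.length then some (pvAppendAt rows k i) else none := by
  induction rows generalizing k with
  | nil =>
      simp [pvFindRow]
  | cons l rest ih =>
      have h0 := h 0
      simp only [List.getD_cons_zero] at h0
      cases k with
      | zero =>
          have hni : i ∉ l := by simp at h0; exact h0
          rw [pvFindRow]
          simp [hni, pvAppendAt]
      | succ k' =>
          have hi : i ∈ l := h0.mpr (Nat.succ_pos _)
          have h' : ∀ j : Nat, i ∈ rest.getD j [] ↔ j < k' := by
            intro j
            have := h (j + 1)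
            simpa [List.getD_cons_succ] using this
          rw [pvFindRow]
          simp only [hi, if_true, ih k' h']
          by_cases hk : k' < rest.length
          · simp [hk, pvAppendAt]
          · simp [hk]

lemma pvInv_le {occ : PySem.Dict Int Int} {rows : List (List Int)}
    (h : pvInv occ rows) (v : Int) : occ.getD v 0 ≤ (rows.length : Int) := by
  by_contra hc
  rw [not_le] at hc
  have := (h.2 v rows.length).mpr hc
  rw [List.getD_eq_default] at this
  · simp at this
  · omega

lemma pvAppendAt_getD (i : Int) (rows : List (List Int)) (k j : Nat)
    (hk : k < rows.length) :
    (pvAppendAt rows k i).getD j [] =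
      if j = k then rows.getD j [] ++ [i] else rows.getD j [] := by
  induction rows generalizing k j with
  | nil => simp at hk
  | cons l rest ih =>
      cases k with
      | zero =>
          cases j with
          | zero => simp [pvAppendAt, List.getD]
          | succ j' => simp [pvAppendAt, List.getD]
      | succ k' =>
          cases j with
          | zero => simp [pvAppendAt, List.getD]
          | succ j' =>
              have hk' : k' < rest.length := by simpa using hk
              simpa [pvAppendAt, List.getD_cons_succ] using ih k' j' hk'

lemma getD_append_empty (rows : List (List Int)) (j : Nat) (v : Int) :
    v ∈ (rows ++ [([] : List Int)]).getD j [] ↔ v ∈ rows.getD j [] := by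
  by_cases hj : j < rows.length
  · rw [List.getD_append _ _ _ _ hj]
  · by_cases hj' : j = rows.length
    · subst hj'
      rw [List.getD_eq_default _ _ (le_refl _),
          List.getD_eq_getElem?_getD, List.getElem?_append_right (le_refl _)]
      simp
    · rw [List.getD_eq_default _ _ (by simp; omega),
          List.getD_eq_default _ _ (by omega)]

lemma pvAppendAt_append (rows : List (List Int)) (x : List Int) (i : Int) :
    pvAppendAt (rows ++ [x]) rows.length i = rows ++ [x ++ [i]] := by
  induction rows with
  | nil => simp [pvAppendAt]
  | cons l rest ih => simp [pvAppendAt, ih]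

lemma pvStep_eq {occ : PySem.Dict Int Int} {rows : List (List Int)}
    (h : pvInv occ rows) (i : Int) :
    pvStepA rows i = (pvStepB (occ, rows) i).2 := by
  have hnn : 0 ≤ occ.getD i 0 := h.1 i
  have hle : occ.getD i 0 ≤ (rows.length : Int) := pvInv_le h i
  have hmem : ∀ j : Nat, i ∈ rows.getD j [] ↔ j < (occ.getD i 0).toNat := by
    intro j
    rw [h.2 i j]
    omega
  have hfr := pvFindRow_eq i rows (occ.getD i 0).toNat hmem
  by_cases hk : (occ.getD i 0).toNat < rows.length
  · have hne : ¬ occ.getD i 0 = (rows.length : Int) := by omega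
    simp [pvStepA, pvStepB, hfr, hk, hne]
  · have hkeq : occ.getD i 0 = (rows.length : Int) := by omega
    have hkn : (occ.getD i 0).toNat = rows.length := by omega
    have h1 : pvStepA rows i = rows ++ [[i]] := by
      simp [pvStepA, hfr, hk]
    have h2 : (pvStepB (occ, rows) i).2 = pvAppendAt (rows ++ [[]]) rows.length i := by
      simp [pvStepB, hkeq, Int.toNat_natCast]
    rw [h1, h2, pvAppendAt_append]
    simp

lemma pvInv_step {occ : PySem.Dict Int Int} {rows : List (List Int)}
    (h : pvInv occ rows) (i : Int) :
    pvInv (pvStepB (occ, rows) i).1 (pvStepB (occ, rows) i).2 := by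
  have hnn : 0 ≤ occ.getD i 0 := h.1 i
  have hle : occ.getD i 0 ≤ (rows.length : Int) := pvInv_le h i
  obtain ⟨rows', hr⟩ : ∃ r, (if occ.getD i 0 = (rows.length : Int) then rows ++ [[]] else rows) = r :=
    ⟨_, rfl⟩
  have hlt : (occ.getD i 0).toNat < rows'.length := by
    by_cases hkeq : occ.getD i 0 = (rows.length : Int)
    · simp only [hkeq, if_true] at hr; subst hr
      simp only [List.length_append, List.length_cons, List.length_nil]; omega
    · simp only [hkeq, if_false] at hr; subst hr; omega
  have hsame : ∀ (v : Int) (j : Nat), v ∈ rows'.getD j [] ↔ v ∈ rows.getD j [] := by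
    by_cases hkeq : occ.getD i 0 = (rows.length : Int)
    · simp only [hkeq, if_true] at hr; subst hr
      exact fun v j => getD_append_empty rows j v
    · simp only [hkeq, if_false] at hr; subst hr
      exact fun v j => Iff.rfl
  have hB1 : (pvStepB (occ, rows) i).1 = occ.insert i (occ.getD i 0 + 1) := rfl
  have hB2 : (pvStepB (occ, rows) i).2 = pvAppendAt rows' (occ.getD i 0).toNat i := by
    simp only [pvStepB, hr]
  constructor
  · intro v
    rw [hB1, PySem.Dict.getD_insert]
    split_ifs with hv
    · omega
    · exact h.1 v
  · intro v j
    rw [hB2, hB1, pvAppendAt_getD i rows' _ j hlt, PySem.Dict.getD_insert]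
    split_ifs with hj hv hv
    · -- j = count i, v = i
      subst hj; subst hv
      rw [List.mem_append, hsame, h.2]
      simp only [List.mem_singleton]
      constructor
      · intro _; omega
      · intro _; exact Or.inr trivial
    · -- j = count i, v ≠ i
      subst hj
      rw [List.mem_append, hsame, h.2]
      simp only [List.mem_singleton]
      constructor
      · rintro (h1 | h1)
        · exact h1
        · exact absurd h1 hv
      · exact fun h1 => Or.inl h1
    · -- j ≠ count i, v = i
      subst hv
      rw [hsame, h.2]
      omega
    · rw [hsame, h.2]

lemma pvFold_eq (nums : List Int) :
    ∀ (occ : PySem.Dict Int Int) (rows : List (List Int)), pvInv occ rows →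
      nums.foldl pvStepA rows = (nums.foldl pvStepB (occ, rows)).2 := by
  induction nums with
  | nil => intro occ rows _; rfl
  | cons i rest ih =>
      intro occ rows h
      simp only [List.foldl_cons]
      rw [pvStep_eq h i]
      have h' := pvInv_step h i
      have := ih (pvStepB (occ, rows) i).1 (pvStepB (occ, rows) i).2 h'
      simpa using this

lemma pvInv_init (i : Int) : pvInv (PySem.Dict.empty.insert i 1) [[i]] := by
  constructor
  · intro v
    rw [PySem.Dict.getD_insert]
    split_ifs <;> simp [PySem.Dict.getD_empty]
  · intro v j
    rw [PySem.Dict.getD_insert]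
    cases j with
    | zero =>
        simp only [List.getD_cons_zero, List.mem_singleton]
        split_ifs with hv
        · subst hv; simp
        · simp [hv, PySem.Dict.getD_empty]
    | succ j' =>
        rw [List.getD_cons_succ, List.getD_eq_default]
        · split_ifs with hv
          · simp
          · simp [PySem.Dict.getD_empty]; omega
        · simp

-- ===== VERDICT (by name: the statement is the Claim_ definition above) =====
theorem findMatrix_lookups_spec : Claim_unchanged_findMatrix_lookups := by
  intro nums _ hD
  unfold D_findMatrix_lookups at hD
  match nums, hD with
  | i :: rest, _ =>
      show (i :: rest).foldl pvStepA [[]] = ((i :: rest).foldl pvStepB (PySem.Dict.empty, [])).2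
      simp only [List.foldl_cons]
      have hA : pvStepA [[]] i = [[i]] := by simp [pvStepA, pvFindRow]
      have hB : pvStepB (PySem.Dict.empty, []) i = (PySem.Dict.empty.insert i 1, [[i]]) := by
        simp [pvStepB, PySem.Dict.getD_empty, pvAppendAt]
      rw [hA, hB]
      exact pvFold_eq rest _ _ (pvInv_init i)

theorem findMatrix_lookups_changed : Claim_changed_findMatrix_lookups := by
  unfold Claim_changed_findMatrix_lookups; decide

theorem findMatrix_lookups_tight : Claim_exact_findMatrix_lookups := by
  intro nums _ hD
  unfold D_findMatrix_lookups at hD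
  subst hD
  decide
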